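-- pv_equiv track=rewrite | github.com/LeeSeungYun1020/Gets | data/getCoordinationFit/get_fit.py | fitDecoder
-- ===== SOURCE A (Python) =====
-- def fitDecoder(fit):
--     singleValuelist = []
--     value = 1
--
--     while fit>0:
--         if fit%2 == 1:
--             singleValuelist.append(value)
--         fit = fit >> 1
--         value = value << 1
--
--     return singleValuelist
-- ===== SOURCE B (Python) =====
-- def fitDecoder(fit):
--     singleValuelist = []
--     while fit > 0:
--         low = fit & -fit
--         singleValuelist.append(low)
--         fit &= fit - 1
--     return singleValuelist
-- ===== Notes on version B (the rewrite author's own statement) =====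
-- stated objective: alternative
-- what changed: Replaces the per-bit-position scan (halving fit while doubling a tracked value) with a lowest-set-bit iteration: each round isolates the lowest set bit with fit & -fit and clears it with fit &= fit - 1, looping once per set bit and reading each power of two directly from the isolated bit.
import Mathlib
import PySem

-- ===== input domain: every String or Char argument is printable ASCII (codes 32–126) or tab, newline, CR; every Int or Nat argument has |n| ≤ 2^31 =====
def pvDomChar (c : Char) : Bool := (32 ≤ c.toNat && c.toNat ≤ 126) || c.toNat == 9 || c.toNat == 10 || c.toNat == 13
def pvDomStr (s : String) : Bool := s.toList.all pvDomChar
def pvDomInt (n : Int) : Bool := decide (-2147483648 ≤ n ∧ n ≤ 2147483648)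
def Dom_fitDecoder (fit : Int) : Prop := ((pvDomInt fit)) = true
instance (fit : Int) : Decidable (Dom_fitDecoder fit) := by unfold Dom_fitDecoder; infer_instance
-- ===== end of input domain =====

-- B replaces A's per-bit-position scan with a lowest-set-bit iteration (fit & -fit / fit &= fit-1); alternative decomposition, equal results proved for all Int inputs.


-- ===== PORT A =====
-- while fit>0: append value when fit%2==1; fit >>= 1; value <<= 1
def fitDecoderGo (fit value : Int) (acc : List Int) : List Int :=
  if h : fit > 0 then
    fitDecoderGo (fit >>> (1:Nat)) (value <<< (1:Nat))
      (if PySem.Int.mod fit 2 = 1 then acc ++ [value] else acc)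
  else acc
termination_by fit.toNat
decreasing_by
  rw [Int.shiftRight_eq_div_pow]
  omega

def fitDecoder (fit : Int) : List Int := fitDecoderGo fit 1 []

-- ===== PORT B =====
-- while fit>0: low = fit & -fit; append low; fit &= fit - 1
def fitDecoderAltGo (fit : Int) : List Int :=
  if h : fit > 0 then
    PySem.Int.band fit (-fit) :: fitDecoderAltGo (PySem.Int.band fit (fit - 1))
  else []
termination_by fit.toNat
decreasing_by
  have hb : PySem.Int.band fit (fit - 1) = ((fit.toNat &&& (fit - 1).toNat : Nat) : Int) :=
    PySem.Int.band_of_nonneg (by omega) (by omega)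
  have hle : fit.toNat &&& (fit - 1).toNat ≤ (fit - 1).toNat := Nat.and_le_right
  omega

def fitDecoder_alt (fit : Int) : List Int := fitDecoderAltGo fit

-- ===== PRECONDITION & SPEC =====
def Spec_fitDecoder (fit : Int) (out : List Int) : Prop := out = fitDecoder_alt fit
instance (fit : Int) (out : List Int) : Decidable (Spec_fitDecoder fit out) := by unfold Spec_fitDecoder; infer_instance

-- ===== CLAIM (what is proved, stated in full; the proofs are below) =====
def Claim_equal_fitDecoder : Prop := ∀ (fit : Int), Dom_fitDecoder fit → Spec_fitDecoder fit (fitDecoder fit)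

-- ===== LEMMAS AND PROOFS =====

-- Nat-level image of B's loop: head isolates the lowest set bit, tail clears it.
def pvM (m : Nat) : List Int :=
  if h : 0 < m then ((m - (m &&& (m - 1)) : Nat) : Int) :: pvM (m &&& (m - 1)) else []
termination_by m
decreasing_by
  have : m &&& (m - 1) ≤ m - 1 := Nat.and_le_right
  omega

theorem land_bitwise (a b : Nat) : a &&& b = Nat.bitwise and a b := rfl

theorem bit_and (x y : Bool) (a b : Nat) :
    (2*a + x.toNat) &&& (2*b + y.toNat) = 2*(a &&& b) + (x && y).toNat := by
  have := Nat.bitwise_bit (f := and) (a := x) (m := a) (b := y) (n := b)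
  simp only [Nat.bit] at this
  rw [land_bitwise, land_bitwise]
  cases x <;> cases y <;> simp_all

theorem pvM_two_mul (t : Nat) : pvM (2 * t) = (pvM t).map (fun x => 2 * x) := by
  induction t using Nat.strong_induction_on with
  | _ t ih =>
    by_cases ht : 0 < t
    · have hk : t &&& (t - 1) < t := lt_of_le_of_lt (Nat.and_le_right) (by omega)
      have hb : (2*t) &&& (2*t - 1) = 2 * (t &&& (t - 1)) := by
        have := bit_and false true t (t - 1)
        simpa [show 2*(t-1) + 1 = 2*t - 1 by omega] using this
      conv_lhs => rw [pvM]
      conv_rhs => rw [pvM]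
      simp only [dif_pos ht, dif_pos (show 0 < 2 * t by omega), List.map_cons]
      rw [hb, ih _ hk]
      have hle : t &&& (t - 1) ≤ t - 1 := Nat.and_le_right
      congr 1
      omega
    · have : t = 0 := by omega
      subst this; simp [pvM]

theorem pvM_step (m : Nat) (hm : 0 < m) :
    pvM m = (if m % 2 = 1 then [(1:Int)] else []) ++ (pvM (m / 2)).map (fun x => 2 * x) := by
  rcases Nat.even_or_odd m with ⟨c, hc⟩ | ⟨c, hc⟩
  · -- m = 2c even
    have hc2 : m = 2 * c := by omega
    subst hc2
    have hmod : 2 * c % 2 = 0 := by omega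
    rw [pvM_two_mul]
    simp [hmod, Nat.mul_div_cancel_left c (by norm_num : 0 < 2)]
  · -- m = 2c + 1 odd
    subst hc
    have hb : (2*c + 1) &&& (2*c) = 2 * c := by
      have := bit_and true false c c
      simpa using this
    rw [pvM]
    simp only [dif_pos hm]
    have h1 : 2*c + 1 - 1 = 2*c := by omega
    rw [h1, hb, pvM_two_mul]
    have hmod : (2*c + 1) % 2 = 1 := by omega
    have hdiv : (2*c + 1) / 2 = c := by omega
    simp [hmod, hdiv]

theorem altGo_eq (m : Nat) : fitDecoderAltGo (m : Int) = pvM m := by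
  induction m using Nat.strong_induction_on with
  | _ m ih =>
    by_cases hm : 0 < m
    · have hk : m &&& (m - 1) < m := lt_of_le_of_lt (Nat.and_le_right) (by omega)
      rw [fitDecoderAltGo, pvM]
      simp only [dif_pos hm, dif_pos (show (m:Int) > 0 by exact_mod_cast hm)]
      have hlow : PySem.Int.band (m : Int) (-(m : Int)) = ((m - (m &&& (m - 1)) : Nat) : Int) := by
        rw [PySem.Int.band]
        have h0 : (0:Int) ≤ (m:Int) := by positivity
        have h1 : ¬ (0:Int) ≤ -(m:Int) := by omega
        simp only [if_pos h0, if_neg h1]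
        congr 1
        have : (-(-(m:Int)) - 1).toNat = m - 1 := by omega
        rw [this, Int.toNat_natCast]
      have htail : PySem.Int.band (m : Int) ((m : Int) - 1) = ((m &&& (m - 1) : Nat) : Int) := by
        have : ((m : Int) - 1) = ((m - 1 : Nat) : Int) := by omega
        rw [this, PySem.Int.band_natCast]
      rw [hlow, htail, ih _ hk]
    · have : m = 0 := by omega
      subst this; rw [fitDecoderAltGo, pvM]; norm_num

theorem go_eq (m : Nat) : ∀ (v : Int) (acc : List Int),
    fitDecoderGo (m : Int) v acc = acc ++ (pvM m).map (fun x => v * x) := by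
  induction m using Nat.strong_induction_on with
  | _ m ih =>
    intro v acc
    by_cases hm : 0 < m
    · rw [fitDecoderGo]
      simp only [dif_pos (show (m:Int) > 0 by exact_mod_cast hm)]
      have hshift : (m : Int) >>> (1:Nat) = ((m / 2 : Nat) : Int) := by
        rw [Int.shiftRight_eq_div_pow]; push_cast; norm_num [Int.ediv_emod_unique]
      have hv : v <<< (1:Nat) = 2 * v := by rw [Int.shiftLeft_eq]; ring
      have hmod : PySem.Int.mod (m : Int) 2 = ((m % 2 : Nat) : Int) := by simp
      rw [hshift, hv, hmod, ih (m / 2) (by omega) (2 * v), pvM_step m hm,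
        List.map_append, ← List.append_assoc]
      have hmap : ((pvM (m / 2)).map (fun x => 2 * x)).map (fun x => v * x)
          = (pvM (m / 2)).map (fun x => 2 * v * x) := by
        rw [List.map_map]; exact List.map_congr_left (fun a _ => by simp only [Function.comp_apply]; ring)
      rw [hmap]
      by_cases hpar : m % 2 = 1
      · rw [if_pos hpar, if_pos (show ((m % 2 : Nat) : Int) = 1 by rw [hpar]; rfl)]
        simp
      · rw [if_neg hpar, if_neg (show ¬((m % 2 : Nat) : Int) = 1 by exact_mod_cast hpar)]
        simp
    · have : m = 0 := by omega
      subst this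
      rw [fitDecoderGo, pvM]; norm_num

-- ===== VERDICT (by name: the statement is the Claim_ definition above) =====
theorem fitDecoder_spec : Claim_equal_fitDecoder := by
  intro fit _
  unfold Spec_fitDecoder fitDecoder fitDecoder_alt
  by_cases h : fit > 0
  · have hm : fit = ((fit.toNat : Nat) : Int) := by omega
    rw [hm, go_eq, altGo_eq]
    simp
  · rw [fitDecoderGo, fitDecoderAltGo]
    simp [h]
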